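-- pv_equiv track=rewrite | github.com/jonberge1337/codigo-hamming | corregir_hamming.py | array_pos
-- ===== SOURCE A (Python) =====
-- def array_pos(lista, salto):
--     """
--     creamos un array dependiendo del salto que tiene que hacer
--     >>> array_pos(["0", "0", "0", "0", "1", "1", "0", "0", "0", "0", "0"], 1)
--     ["0", "?", "0", "?", "1", "?", "0", "?", "0", "?", "0"]
--     """
--     tamaino = len(lista)
--     lista_temporal = []
--
--     # recortamos la cadena para que empiece en ese elemento
--     lista = lista[salto-1:]
--
--     # añadimos una variable apoyo para conservar todas las posiciones
--     vacios = "?" * (salto-1)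
--     lista_temporal += vacios
--
--     vacios = "?" * salto
--     nsalto = salto * 2
--     while len(lista) > 0:
--         # tomamos los elementos segun la paridad
--         lista_temporal += lista[:salto]
--         lista_temporal += vacios
--
--         # quitamos la informacion copiada mas la vacia
--         lista = lista[nsalto:]
--
--     # recortamos la lista al tamaño de la lista original
--     # para no tener ? de sobra
--     lista_temporal = lista_temporal[:tamaino]
--
--     return lista_temporal
-- ===== SOURCE B (Python) =====
-- def array_pos(lista, salto):
--     # Single pass: position i+1 belongs to a parity block iff ((i+1)//salto) is even.
--     return ["?" if ((i + 1) // salto) % 2 == 0 else x for i, x in enumerate(lista)]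
-- ===== Notes on version B (the rewrite author's own statement) =====
-- stated objective: simpler
-- what changed: Replaces the slice-and-concatenate while loop (prefix padding, chunk copying, final truncation) with a one-line single pass that decides each index directly by block arithmetic ((i+1)//salto parity).
-- outside the precondition, e.g. on array_pos([], 0): A returns [], B returns []
import Mathlib
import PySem

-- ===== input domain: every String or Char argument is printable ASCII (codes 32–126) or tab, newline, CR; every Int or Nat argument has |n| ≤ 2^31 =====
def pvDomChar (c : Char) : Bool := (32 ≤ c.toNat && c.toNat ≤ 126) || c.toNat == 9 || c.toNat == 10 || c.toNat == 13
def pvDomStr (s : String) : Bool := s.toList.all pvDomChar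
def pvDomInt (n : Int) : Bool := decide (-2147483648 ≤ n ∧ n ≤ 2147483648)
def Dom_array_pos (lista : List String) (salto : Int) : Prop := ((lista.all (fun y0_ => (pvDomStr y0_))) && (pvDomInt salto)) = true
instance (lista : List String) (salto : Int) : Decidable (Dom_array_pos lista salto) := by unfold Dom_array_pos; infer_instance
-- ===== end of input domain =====

-- B replaces A's slice-and-concatenate while loop with a one-line single pass that decides
-- each index directly by block arithmetic; objective: simpler.

-- ===== PORT A =====
-- the while loop of A; the fuel argument only makes the recursion structural: on inputs
-- with salto ≥ 1 the Python loop removes at least one element per iteration, so fuel =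
-- initial length never runs out (for salto ≤ 0 the Python loop diverges; outside Pre_)
def apLoop (salto nsalto : Int) (vacios : List String) : Nat → List String → List String → List String
  | 0, _, acc => acc
  | fuel + 1, lista, acc =>
      if lista.length > 0 then
        apLoop salto nsalto vacios fuel (PySem.List.slice lista (some nsalto) none)
          (acc ++ PySem.List.slice lista none (some salto) ++ vacios)
      else acc

def array_pos (lista : List String) (salto : Int) : List String :=
  let tamaino : Int := lista.length
  let lista1 := PySem.List.slice lista (some (salto - 1)) none
  -- lista_temporal += "?" * (salto-1): adds (salto-1) one-char strings "?"
  let lista_temporal : List String := List.replicate (salto - 1).toNat "?"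
  let vacios : List String := List.replicate salto.toNat "?"
  let nsalto := salto * 2
  let lista_temporal := apLoop salto nsalto vacios lista1.length lista1 lista_temporal
  PySem.List.slice lista_temporal none (some tamaino)

-- ===== PORT B =====
def array_pos_alt (lista : List String) (salto : Int) : List String :=
  (PySem.List.enumerate lista).map
    (fun p => if PySem.Int.mod (PySem.Int.floordiv (p.1 + 1) salto) 2 = 0 then "?" else p.2)

-- ===== PRECONDITION & SPEC =====
-- Pre_ excludes salto < 1: there Python A loops forever whenever lista is nonempty (the
-- slice keeps a nonempty tail that lista[nsalto:] never shrinks), and B raises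
-- ZeroDivisionError for salto = 0; for salto < 1 with lista = [] both return [].
def Pre_array_pos (lista : List String) (salto : Int) : Prop := 1 ≤ salto
instance (lista : List String) (salto : Int) : Decidable (Pre_array_pos lista salto) := by unfold Pre_array_pos; infer_instance
def pvWitness_array_pos : List String × Int := (["0", "0", "0", "0", "1", "1", "0"], 1)

def Spec_array_pos (lista : List String) (salto : Int) (out : List String) : Prop := out = array_pos_alt lista salto
instance (lista : List String) (salto : Int) (out : List String) : Decidable (Spec_array_pos lista salto out) := by unfold Spec_array_pos; infer_instance

-- ===== CLAIM (what is proved, stated in full; the proofs are below) =====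
def Claim_equal_array_pos : Prop := ∀ (lista : List String) (salto : Int), Dom_array_pos lista salto → Pre_array_pos lista salto → Spec_array_pos lista salto (array_pos lista salto)

-- ===== LEMMAS AND PROOFS =====

-- the loop accumulates by appending on the right
lemma apLoop_acc (salto nsalto : Int) (v : List String) :
    ∀ (fuel : Nat) (l acc : List String),
      apLoop salto nsalto v fuel l acc = acc ++ apLoop salto nsalto v fuel l [] := by
  intro fuel
  induction fuel with
  | zero => intro l acc; simp [apLoop]
  | succ n ih =>
      intro l acc
      simp only [apLoop]
      split
      · rw [ih _ (acc ++ _ ++ _), ih _ ([] ++ _ ++ _)]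
        simp
      · simp

-- characterisation of the loop output (salto ≥ 1, enough fuel):
-- it is at least as long as its input and element j is l[j] when (j / s) is even, else "?"
lemma apLoop_spec (s : Nat) (hs : 1 ≤ s) :
    ∀ (fuel : Nat) (l : List String), l.length ≤ fuel →
      l.length ≤ (apLoop (s : Int) ((s : Int) * 2) (List.replicate s "?") fuel l []).length ∧
      ∀ j (hj : j < l.length),
        (apLoop (s : Int) ((s : Int) * 2) (List.replicate s "?") fuel l [])[j]? =
          some (if (j / s) % 2 = 0 then l[j] else "?") := by
  intro fuel
  induction fuel with
  | zero =>
      intro l hl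
      have : l = [] := List.eq_nil_of_length_eq_zero (Nat.le_zero.mp hl)
      subst this; simp
  | succ n ih =>
      intro l hl
      by_cases hne : l.length > 0
      · have hstep : apLoop (s : Int) ((s : Int) * 2) (List.replicate s "?") (n + 1) l [] =
            (l.take s ++ List.replicate s "?") ++
              apLoop (s : Int) ((s : Int) * 2) (List.replicate s "?") n (l.drop (2 * s)) [] := by
          simp only [apLoop, if_pos hne]
          rw [apLoop_acc]
          have h2 : ((s : Int) * 2) = ((2 * s : Nat) : Int) := by push_cast; ring
          rw [h2, PySem.List.slice_from_natCast, PySem.List.slice_to_natCast]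
          simp
        have hdl : (l.drop (2 * s)).length ≤ n := by
          simp only [List.length_drop]; omega
        obtain ⟨ihlen, ihget⟩ := ih (l.drop (2 * s)) hdl
        have hheadlen : (l.take s ++ List.replicate s "?").length = min l.length s + s := by
          simp [Nat.min_comm]
        constructor
        · rw [hstep]
          simp only [List.length_append, List.length_take, List.length_replicate]
          simp only [List.length_drop] at ihlen
          omega
        · intro j hj
          rw [hstep]
          by_cases hjs : j < s
          · -- inside the copied chunk
            have hjh : j < (l.take s ++ List.replicate s "?").length := by rw [hheadlen]; omega
            rw [List.getElem?_append_left hjh]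
            rw [List.getElem?_append_left (by simp; omega)]
            have : (j / s) = 0 := Nat.div_eq_of_lt hjs
            simp [this, hjs, List.getElem?_eq_getElem hj]
          · by_cases hj2 : j < 2 * s
            · -- inside the "?" padding; since j < l.length and s ≤ j, l.length > s
              have hls : s < l.length := by omega
              have hhl : (l.take s ++ List.replicate s "?").length = 2 * s := by
                rw [hheadlen]; omega
              have hjh : j < (l.take s ++ List.replicate s "?").length := by omega
              rw [List.getElem?_append_left hjh]
              rw [List.getElem?_append_right (by simp; omega)]
              have hq : j / s = 1 := by
                apply Nat.div_eq_of_lt_le <;> omega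
              simp only [List.length_take, min_eq_right (le_of_lt hls)] at *
              rw [List.getElem?_replicate]
              simp [hq]; omega
            · -- in the recursive part
              have hls : 2 * s ≤ l.length := by omega
              have hhl : (l.take s ++ List.replicate s "?").length = 2 * s := by
                rw [hheadlen]; omega
              rw [List.getElem?_append_right (by omega)]
              rw [hhl]
              have hjd : j - 2 * s < (l.drop (2 * s)).length := by
                simp only [List.length_drop]; omega
              rw [ihget (j - 2 * s) hjd]
              have hdiv : j / s = (j - 2 * s) / s + 2 := by
                have h := Nat.add_mul_div_right (j - 2 * s) 2 (show 0 < s by omega)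
                have hj' : j - 2 * s + 2 * s = j := by omega
                rw [hj'] at h
                omega
              have hmod : (j / s) % 2 = ((j - 2 * s) / s) % 2 := by
                rw [hdiv]; omega
              have hgd : (l.drop (2 * s))[j - 2 * s] = l[j] := by
                rw [List.getElem_drop]
                congr 1; omega
              rw [hmod, hgd]
      · have : l = [] := by
          cases l with
          | nil => rfl
          | cons a t => simp at hne
        subst this; simp [apLoop]

-- B's output, pointwise
lemma alt_get (lista : List String) (s : Nat) (i : Nat) (hi : i < lista.length) :
    (array_pos_alt lista (s : Int))[i]? =
      some (if ((i + 1) / s) % 2 = 0 then "?" else lista[i]) := by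
  unfold array_pos_alt
  rw [List.getElem?_map, PySem.List.getElem?_enumerate, List.getElem?_eq_getElem hi]
  have hfd : PySem.Int.floordiv ((0 : Int) + (i : Int) + 1) (s : Int) = (((i + 1) / s : Nat) : Int) := by
    have : (0 : Int) + (i : Int) + 1 = ((i + 1 : Nat) : Int) := by push_cast; ring
    rw [this, PySem.Int.floordiv_natCast]
  have hmd : PySem.Int.mod (((i + 1) / s : Nat) : Int) 2 = ((((i + 1) / s) % 2 : Nat) : Int) := by
    exact_mod_cast PySem.Int.mod_natCast ((i + 1) / s) 2
  simp only [Option.map_some]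
  rw [hfd, hmd]
  have hcond : ((((i + 1) / s % 2 : Nat)) : Int) = 0 ↔ (i + 1) / s % 2 = 0 := by
    exact_mod_cast Iff.rfl
  rw [if_congr hcond rfl rfl]

lemma length_alt (lista : List String) (salto : Int) :
    (array_pos_alt lista salto).length = lista.length := by
  unfold array_pos_alt
  rw [List.length_map, PySem.List.enumerate_eq_zipIdx_map, List.length_map, List.length_zipIdx]

-- ===== VERDICT (by name: the statement is the Claim_ definition above) =====
theorem array_pos_spec : Claim_equal_array_pos := by
  intro lista salto _hdom hpre
  unfold Pre_array_pos at hpre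
  unfold Spec_array_pos array_pos
  -- work with salto = (s : Nat), 1 ≤ s
  obtain ⟨s, rfl⟩ : ∃ s : Nat, salto = (s : Int) :=
    ⟨salto.toNat, (Int.toNat_of_nonneg (by omega)).symm⟩
  have hs : 1 ≤ s := by exact_mod_cast hpre
  simp only []
  have hsl : PySem.List.slice lista (some ((s : Int) - 1)) none = lista.drop (s - 1) := by
    have : ((s : Int) - 1) = ((s - 1 : Nat) : Int) := by omega
    rw [this, PySem.List.slice_from_natCast]
  have htn : ((s : Int) - 1).toNat = s - 1 := by omega
  have hsn : (s : Int).toNat = s := by omega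
  rw [hsl, htn, hsn]
  set l := lista.drop (s - 1) with hldef
  obtain ⟨hlen, hget⟩ := apLoop_spec s hs l.length l (le_refl _)
  set out := apLoop (s : Int) ((s : Int) * 2) (List.replicate s "?") l.length l [] with houtdef
  rw [apLoop_acc]
  have htam : PySem.List.slice (List.replicate (s - 1) "?" ++ out) none (some (lista.length : Int))
      = (List.replicate (s - 1) "?" ++ out).take lista.length := by
    rw [PySem.List.slice_to_natCast]
  rw [htam]
  have hll : l.length = lista.length - (s - 1) := by
    rw [hldef, List.length_drop]
  -- pointwise equality
  apply List.ext_getElem?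
  intro i
  by_cases hi : i < lista.length
  · rw [List.getElem?_take, if_pos hi]
    rw [alt_get lista s i hi]
    by_cases hip : i < s - 1
    · -- prefix "?": B gives "?" because (i+1)/s = 0
      rw [List.getElem?_append_left (by simp; omega)]
      rw [List.getElem?_replicate]
      have : (i + 1) / s = 0 := Nat.div_eq_of_lt (by omega)
      simp [hip, this]
    · -- data region
      have hj : i - (s - 1) < l.length := by omega
      rw [List.getElem?_append_right (by simp; omega)]
      simp only [List.length_replicate]
      rw [hget (i - (s - 1)) hj]
      have hgd : l[i - (s - 1)]'hj = lista[i]'hi := by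
        simp only [hldef, List.getElem_drop]
        congr 1; omega
      have hdiv : (i + 1) / s = (i - (s - 1)) / s + 1 := by
        have h1 : i + 1 = (i - (s - 1)) + 1 * s := by omega
        rw [h1, Nat.add_mul_div_right _ _ (by omega : 0 < s)]
      have hpar : ((i - (s - 1)) / s) % 2 = 0 ↔ ¬ ((i + 1) / s) % 2 = 0 := by
        rw [hdiv]; omega
      rw [hgd]
      by_cases h : ((i - (s - 1)) / s) % 2 = 0
      · rw [if_pos h, if_neg (by omega)]
      · rw [if_neg h, if_pos (by omega)]
  · rw [List.getElem?_eq_none, List.getElem?_eq_none]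
    · rw [length_alt]; omega
    · simp only [List.length_take]; omega
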